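-- pv_equiv track=rewrite | github.com/AbbadKamel/Markov | Markov_GIIS/new article/last_version/testing.py | detect_ddos
-- ===== SOURCE A (Python) =====
-- def detect_ddos(packet_counts, packet_types, interval_timings, thresholds):
--     current_state = 0  # Authentic is represented by 0
--     state_history = [current_state]
--     state_durations = {state: 0 for state in range(13)}  # Track duration in each state
--
--     for packet_count, packet_type, interval_timing in zip(packet_counts, packet_types, interval_timings):
--         if packet_count > thresholds['high']:
--             if current_state == 0:  # Authentic
--                 next_state = 1  # Peripheral Low Risk (P1)
--             elif current_state == 1:  # P1
--                 if packet_type == 'suspicious':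
--                     next_state = 2  # Peripheral Medium Risk (P2)
--                 else:
--                     next_state = 3  # Core Low Risk (C1)
--             elif current_state == 2:  # P2
--                 next_state = 4  # Peripheral High Risk (P3)
--             elif current_state == 3:  # C1
--                 if interval_timing < thresholds['interval']:
--                     next_state = 5  # Core Medium Risk (C2)
--                 else:
--                     next_state = 6  # Peripheral Critical Risk (P4)
--             elif current_state == 4:  # P3
--                 next_state = 7  # Core High Risk (C3)
--             elif current_state == 5:  # C2
--                 next_state = 8  # Core Critical Risk (C4)
--             elif current_state == 6:  # P4
--                 next_state = 9  # Observation (Obs)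
--             elif current_state == 7:  # C3
--                 next_state = 10  # Suspicion (S)
--             elif current_state == 8:  # C4
--                 next_state = 11  # Blocked (B)
--             elif current_state == 9:  # Obs
--                 next_state = 12  # Shutdown (SD)
--             elif current_state == 10:  # S
--                 next_state = 12  # Shutdown (SD)
--             elif current_state == 11:  # B
--                 next_state = 12  # Shutdown (SD)
--         else:
--             next_state = 0  # Revert to Authentic if thresholds are not met
--
--         state_history.append(next_state)
--         state_durations[next_state] += 1  # Track how long we're in the state
--         current_state = next_state
--
--     return state_history, state_durations
-- ===== SOURCE B (Python) =====
-- def detect_ddos(packet_counts, packet_types, interval_timings, thresholds):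
--     # Run-segmentation view: split the stream into maximal runs of above-threshold
--     # packets; each run follows one closed-form escalation path chosen from its
--     # 2nd/3rd packets, padded with 12 (Shutdown); durations counted in a second pass.
--     packets = list(zip(packet_counts, packet_types, interval_timings))
--     durations = {s: 0 for s in range(13)}
--     if not packets:
--         return [0], durations
--     high = thresholds['high']
--     states = []
--     i, n = 0, len(packets)
--     while i < n:
--         if packets[i][0] <= high:
--             states.append(0)
--             i += 1
--         else:
--             j = i
--             while j < n and packets[j][0] > high:
--                 j += 1
--             run = packets[i:j]
--             L = len(run)
--             if L >= 2 and run[1][1] == 'suspicious':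
--                 seq = [1, 2, 4, 7, 10]
--             elif L >= 3 and run[2][2] < thresholds['interval']:
--                 seq = [1, 3, 5, 8, 11]
--             elif L >= 3:
--                 seq = [1, 3, 6, 9]
--             else:
--                 seq = [1, 3]
--             states.extend(seq[k] if k < len(seq) else 12 for k in range(L))
--             i = j
--     for s in states:
--         durations[s] += 1
--     return [0] + states, durations
-- ===== Notes on version B (the rewrite author's own statement) =====
-- stated objective: alternative
-- what changed: B segments the stream into maximal above-threshold runs and emits each run's closed-form escalation path ([1,2,4,7,10], [1,3,5,8,11] or [1,3,6,9], padded with 12) chosen from the run's 2nd/3rd packets, then counts state durations in a separate pass, instead of A's per-packet 12-branch transition machine with a running state and dict updates.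
import Mathlib
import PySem

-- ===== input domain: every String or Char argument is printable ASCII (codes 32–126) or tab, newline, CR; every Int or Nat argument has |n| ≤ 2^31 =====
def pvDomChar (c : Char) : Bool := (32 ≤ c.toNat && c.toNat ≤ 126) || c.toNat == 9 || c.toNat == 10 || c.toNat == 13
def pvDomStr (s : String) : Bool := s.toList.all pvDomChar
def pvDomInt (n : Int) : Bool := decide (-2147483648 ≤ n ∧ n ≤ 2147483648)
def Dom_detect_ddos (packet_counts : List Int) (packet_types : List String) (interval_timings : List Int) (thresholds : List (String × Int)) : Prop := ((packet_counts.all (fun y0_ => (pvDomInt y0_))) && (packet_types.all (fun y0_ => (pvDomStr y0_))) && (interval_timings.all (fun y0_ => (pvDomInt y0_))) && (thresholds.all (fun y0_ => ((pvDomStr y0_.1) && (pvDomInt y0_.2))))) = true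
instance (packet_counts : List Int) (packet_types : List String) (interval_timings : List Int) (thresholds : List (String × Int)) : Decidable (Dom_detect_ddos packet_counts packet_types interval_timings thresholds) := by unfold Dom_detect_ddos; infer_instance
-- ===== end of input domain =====

-- B replaces A's per-packet 12-branch transition machine by run segmentation:
-- each maximal above-threshold run emits one closed-form escalation path (padded
-- with 12), and durations are counted in a separate pass; objective: alternative.

-- ===== PORT A =====

-- A's next-state computation (the elif chain); prev is the leftover next_state variable
def detect_ddos_nextA (high interval prev cur : Int) (p : Int × String × Int) : Int :=
  if p.1 > high then
    if cur = 0 then 1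
    else if cur = 1 then (if p.2.1 = "suspicious" then 2 else 3)
    else if cur = 2 then 4
    else if cur = 3 then (if p.2.2 < interval then 5 else 6)
    else if cur = 4 then 7
    else if cur = 5 then 8
    else if cur = 6 then 9
    else if cur = 7 then 10
    else if cur = 8 then 11
    else if cur = 9 then 12
    else if cur = 10 then 12
    else if cur = 11 then 12
    else prev            -- Python: next_state keeps its previous value (no branch assigns)
  else 0

-- one iteration of A's loop; the state carries (current_state, next_state, history, durations),
-- where the second component is the LEFTOVER value of the Python variable next_state from the
-- previous iteration (read only when current_state = 12); it starts as 0 (the Python variable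
-- is unbound then, but the first iteration always assigns it).
def detect_ddos_stepA (high interval : Int)
    (st : Int × Int × List Int × PySem.Dict Int Int) (p : Int × String × Int) :
    Int × Int × List Int × PySem.Dict Int Int :=
  let next := detect_ddos_nextA high interval st.2.1 st.1 p
  (next, next, st.2.2.1 ++ [next], st.2.2.2.modify next 0 (· + 1))

def detect_ddos (packet_counts : List Int) (packet_types : List String) (interval_timings : List Int) (thresholds : List (String × Int)) : List Int × (List (Int × Int)) :=
  -- thresholds['high'] / thresholds['interval']: first match in the assoc list; the
  -- .getD 0 default is only reached outside Pre_ (Python raises KeyError there)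
  let high := (List.lookup "high" thresholds).getD 0
  let interval := (List.lookup "interval" thresholds).getD 0
  let durations0 : PySem.Dict Int Int :=
    (PySem.List.pyRange 0 13 1).foldl (fun d s => d.insert s 0) PySem.Dict.empty
  let fin := (packet_counts.zip (packet_types.zip interval_timings)).foldl
    (detect_ddos_stepA high interval) (0, 0, [0], durations0)
  (fin.2.2.1, fin.2.2.2.items)

-- ===== PORT B =====

-- the closed-form state path of one maximal above-threshold run, chosen from the
-- run's 2nd packet's type and 3rd packet's timing, padded with 12 (Shutdown)
def detect_ddos_seqFor (interval : Int) (run : List (Int × String × Int)) : List Int :=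
  let seq :=
    if 2 ≤ run.length ∧ (run.getD 1 (0, "", 0)).2.1 = "suspicious" then [1, 2, 4, 7, 10]
    else if 3 ≤ run.length ∧ (run.getD 2 (0, "", 0)).2.2 < interval then [1, 3, 5, 8, 11]
    else if 3 ≤ run.length then [1, 3, 6, 9]
    else [1, 3]
  (List.range run.length).map (fun k => seq.getD k 12)

-- Source B's outer while loop: low packets emit 0, a maximal above-threshold run emits its path
def detect_ddos_runs (high interval : Int) : List (Int × String × Int) → List Int
  | [] => []
  | p :: rest =>
    if _h : p.1 ≤ high then 0 :: detect_ddos_runs high interval rest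
    else
      detect_ddos_seqFor interval ((p :: rest).takeWhile (fun q => decide (q.1 > high)))
        ++ detect_ddos_runs high interval ((p :: rest).dropWhile (fun q => decide (q.1 > high)))
termination_by l => l.length
decreasing_by
  · simp
  · have hgt : p.1 > high := by omega
    rw [List.dropWhile_cons, if_pos (by simpa using hgt)]
    have := List.length_dropWhile_le (p := fun q : Int × String × Int => decide (q.1 > high)) (l := rest)
    simp; omega

def detect_ddos_alt (packet_counts : List Int) (packet_types : List String) (interval_timings : List Int) (thresholds : List (String × Int)) : List Int × (List (Int × Int)) :=
  let packets := packet_counts.zip (packet_types.zip interval_timings)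
  let durations0 : PySem.Dict Int Int :=
    (PySem.List.pyRange 0 13 1).foldl (fun d s => d.insert s 0) PySem.Dict.empty
  if packets.isEmpty then ([0], durations0.items)
  else
    let high := (List.lookup "high" thresholds).getD 0
    let interval := (List.lookup "interval" thresholds).getD 0
    let states := detect_ddos_runs high interval packets
    ((0 : Int) :: states, (states.foldl (fun d s => d.modify s 0 (· + 1)) durations0).items)

-- ===== PRECONDITION & SPEC =====
-- Pre_ excludes exactly the inputs on which A raises KeyError: thresholds lacking the
-- 'high' key while packets are present, or lacking the 'interval' key while the packet
-- stream drives the machine into state 3 with a high packet count (which happens exactly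
-- when three consecutive above-threshold counts follow a stream start or a low count,
-- with a non-'suspicious' type in the middle).
def Pre_detect_ddos (packet_counts : List Int) (packet_types : List String) (interval_timings : List Int) (thresholds : List (String × Int)) : Prop :=
  (packet_counts.zip (packet_types.zip interval_timings) = [] ∨
      (List.lookup "high" thresholds).isSome) ∧
  ((∃ k, k < (packet_counts.zip (packet_types.zip interval_timings)).length ∧
      k + 2 < (packet_counts.zip (packet_types.zip interval_timings)).length ∧
      ((packet_counts.zip (packet_types.zip interval_timings)).getD k (0, "", 0)).1
        > (List.lookup "high" thresholds).getD 0 ∧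
      ((packet_counts.zip (packet_types.zip interval_timings)).getD (k+1) (0, "", 0)).1
        > (List.lookup "high" thresholds).getD 0 ∧
      ((packet_counts.zip (packet_types.zip interval_timings)).getD (k+1) (0, "", 0)).2.1
        ≠ "suspicious" ∧
      ((packet_counts.zip (packet_types.zip interval_timings)).getD (k+2) (0, "", 0)).1
        > (List.lookup "high" thresholds).getD 0 ∧
      (k = 0 ∨ ((packet_counts.zip (packet_types.zip interval_timings)).getD (k-1) (0, "", 0)).1
        ≤ (List.lookup "high" thresholds).getD 0)) →
    (List.lookup "interval" thresholds).isSome)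
instance (packet_counts : List Int) (packet_types : List String) (interval_timings : List Int) (thresholds : List (String × Int)) : Decidable (Pre_detect_ddos packet_counts packet_types interval_timings thresholds) := by unfold Pre_detect_ddos; infer_instance

def pvWitness_detect_ddos : List Int × List String × List Int × (List (String × Int)) :=
  ([5, 1, 9], ["suspicious", "x", "x"], [0, 0, 20], [("high", 3), ("interval", 10)])

def Spec_detect_ddos (packet_counts : List Int) (packet_types : List String) (interval_timings : List Int) (thresholds : List (String × Int)) (out : List Int × (List (Int × Int))) : Prop := out = detect_ddos_alt packet_counts packet_types interval_timings thresholds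
instance (packet_counts : List Int) (packet_types : List String) (interval_timings : List Int) (thresholds : List (String × Int)) (out : List Int × (List (Int × Int))) : Decidable (Spec_detect_ddos packet_counts packet_types interval_timings thresholds out) := by unfold Spec_detect_ddos; infer_instance

-- ===== CLAIM (what is proved, stated in full; the proofs are below) =====
def Claim_equal_detect_ddos : Prop := ∀ (packet_counts : List Int) (packet_types : List String) (interval_timings : List Int) (thresholds : List (String × Int)), Dom_detect_ddos packet_counts packet_types interval_timings thresholds → Pre_detect_ddos packet_counts packet_types interval_timings thresholds → Spec_detect_ddos packet_counts packet_types interval_timings thresholds (detect_ddos packet_counts packet_types interval_timings thresholds)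

-- ===== LEMMAS AND PROOFS =====

-- reference: the state sequence A produces (next_state leftover = current state throughout)
def detect_ddos_refStates (high interval s : Int) : List (Int × String × Int) → List Int
  | [] => []
  | p :: rest =>
    detect_ddos_nextA high interval s s p ::
      detect_ddos_refStates high interval (detect_ddos_nextA high interval s s p) rest

def detect_ddos_refFinal (high interval s : Int) : List (Int × String × Int) → Int
  | [] => s
  | p :: rest => detect_ddos_refFinal high interval (detect_ddos_nextA high interval s s p) rest

lemma detect_ddos_nextA_low (high interval s : Int) (p : Int × String × Int)
    (h : p.1 ≤ high) : detect_ddos_nextA high interval s s p = 0 := by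
  have : ¬ p.1 > high := by omega
  simp [detect_ddos_nextA, this]

-- A's fold characterised by the reference state sequence
lemma detect_ddos_foldA (high interval : Int) (l : List (Int × String × Int)) :
    ∀ (s : Int) (hist : List Int) (dur : PySem.Dict Int Int),
      l.foldl (detect_ddos_stepA high interval) (s, s, hist, dur)
        = (detect_ddos_refFinal high interval s l, detect_ddos_refFinal high interval s l,
           hist ++ detect_ddos_refStates high interval s l,
           (detect_ddos_refStates high interval s l).foldl
             (fun d x => d.modify x 0 (· + 1)) dur) := by
  induction l with
  | nil => intro s hist dur; simp [detect_ddos_refFinal, detect_ddos_refStates]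
  | cons p rest ih =>
    intro s hist dur
    rw [List.foldl_cons]
    show rest.foldl _ (detect_ddos_nextA high interval s s p, detect_ddos_nextA high interval s s p, _, _) = _
    rw [ih]
    simp [detect_ddos_refFinal, detect_ddos_refStates]

lemma detect_ddos_refStates_append (high interval : Int) (xs ys : List (Int × String × Int)) :
    ∀ s, detect_ddos_refStates high interval s (xs ++ ys)
      = detect_ddos_refStates high interval s xs
        ++ detect_ddos_refStates high interval (detect_ddos_refFinal high interval s xs) ys := by
  induction xs with
  | nil => intro s; simp [detect_ddos_refStates, detect_ddos_refFinal]
  | cons p rest ih =>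
    intro s
    simp [detect_ddos_refStates, detect_ddos_refFinal, ih]

-- when the head packet is low the start state is irrelevant (it resets to 0)
lemma detect_ddos_refStates_reset (high interval s s' : Int) :
    ∀ (l : List (Int × String × Int)), (∀ q ∈ l.head?, q.1 ≤ high) →
      detect_ddos_refStates high interval s l = detect_ddos_refStates high interval s' l := by
  intro l hl
  cases l with
  | nil => rfl
  | cons q t =>
    have hq : q.1 ≤ high := hl q (by simp)
    simp [detect_ddos_refStates, detect_ddos_nextA_low _ _ _ _ hq]

-- ChainOK s seq: from state s, every above-threshold packet drives A along seq, then 12s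
def detect_ddos_ChainOK (high interval : Int) : Int → List Int → Prop
  | s, [] => ∀ p : Int × String × Int, p.1 > high → detect_ddos_nextA high interval s s p = 12
  | s, a :: seq => (∀ p : Int × String × Int, p.1 > high → detect_ddos_nextA high interval s s p = a)
      ∧ detect_ddos_ChainOK high interval a seq

lemma detect_ddos_chain12 (high interval : Int) : detect_ddos_ChainOK high interval 12 [] := by
  intro p hp; simp [detect_ddos_nextA, hp]

lemma detect_ddos_chain_emit (high interval : Int) :
    ∀ (l : List (Int × String × Int)), (∀ q ∈ l, q.1 > high) →
    ∀ (s : Int) (seq : List Int), detect_ddos_ChainOK high interval s seq →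
      detect_ddos_refStates high interval s l
        = (List.range l.length).map (fun k => seq.getD k 12) := by
  intro l
  induction l with
  | nil => intro _ s seq _; simp [detect_ddos_refStates]
  | cons p rest ih =>
    intro hl s seq hc
    have hp : p.1 > high := hl p (by simp)
    have hrest : ∀ q ∈ rest, q.1 > high := fun q hq => hl q (by simp [hq])
    cases seq with
    | nil =>
      have hnext := hc p hp
      simp only [detect_ddos_refStates, hnext]
      rw [ih hrest 12 [] (detect_ddos_chain12 high interval)]
      simp [List.range_succ_eq_map, List.map_map, Function.comp_def]
    | cons a seq' =>
      have hnext := hc.1 p hp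
      simp only [detect_ddos_refStates, hnext]
      rw [ih hrest a seq' hc.2]
      simp [List.range_succ_eq_map, List.map_map, Function.comp_def]

lemma detect_ddos_chainOK2 (high interval : Int) :
    detect_ddos_ChainOK high interval 2 [4, 7, 10] := by
  refine ⟨fun p hp => ?_, fun p hp => ?_, fun p hp => ?_, fun p hp => ?_⟩ <;>
    simp [detect_ddos_nextA, hp]

lemma detect_ddos_chainOK5 (high interval : Int) :
    detect_ddos_ChainOK high interval 5 [8, 11] := by
  refine ⟨fun p hp => ?_, fun p hp => ?_, fun p hp => ?_⟩ <;>
    simp [detect_ddos_nextA, hp]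

lemma detect_ddos_chainOK6 (high interval : Int) :
    detect_ddos_ChainOK high interval 6 [9] := by
  refine ⟨fun p hp => ?_, fun p hp => ?_⟩ <;>
    simp [detect_ddos_nextA, hp]

-- one maximal above-threshold run: A's states equal B's closed-form path
lemma detect_ddos_run_emit (high interval : Int) :
    ∀ (run : List (Int × String × Int)), run ≠ [] → (∀ q ∈ run, q.1 > high) →
      detect_ddos_refStates high interval 0 run = detect_ddos_seqFor interval run := by
  intro run hne hall
  match run with
  | [] => exact absurd rfl hne
  | [p] =>
    have hp : p.1 > high := hall p (by simp)
    simp [detect_ddos_refStates, detect_ddos_nextA, hp, detect_ddos_seqFor]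
  | [p, q] =>
    have hp : p.1 > high := hall p (by simp)
    have hq : q.1 > high := hall q (by simp)
    by_cases hs : q.2.1 = "suspicious" <;>
      simp [detect_ddos_refStates, detect_ddos_nextA, hp, hq, hs, detect_ddos_seqFor,
            List.range_succ]
  | p :: q :: r :: t =>
    have hp : p.1 > high := hall p (by simp)
    have hq : q.1 > high := hall q (by simp)
    have hr : r.1 > high := hall r (by simp)
    have hrt : ∀ x ∈ r :: t, x.1 > high := fun x hx => hall x (by simp at hx; rcases hx with h | h <;> simp [h])
    have ht : ∀ x ∈ t, x.1 > high := fun x hx => hall x (by simp [hx])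
    have h1 : detect_ddos_nextA high interval 0 0 p = 1 := by
      simp [detect_ddos_nextA, hp]
    by_cases hs : q.2.1 = "suspicious"
    · have h2 : detect_ddos_nextA high interval 1 1 q = 2 := by
        simp [detect_ddos_nextA, hq, hs]
      have hchain := detect_ddos_chain_emit high interval (r :: t) hrt 2 [4, 7, 10]
        (detect_ddos_chainOK2 high interval)
      rw [detect_ddos_refStates, h1, detect_ddos_refStates, h2, hchain]
      simp only [detect_ddos_seqFor]
      rw [if_pos (by simp [hs])]
      simp [List.range_succ_eq_map, List.map_map, Function.comp_def]
    · have h2 : detect_ddos_nextA high interval 1 1 q = 3 := by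
        simp [detect_ddos_nextA, hq, hs]
      by_cases hi : r.2.2 < interval
      · have h3 : detect_ddos_nextA high interval 3 3 r = 5 := by
          simp [detect_ddos_nextA, hr, hi]
        have hchain := detect_ddos_chain_emit high interval t ht 5 [8, 11]
          (detect_ddos_chainOK5 high interval)
        rw [detect_ddos_refStates, h1, detect_ddos_refStates, h2,
            detect_ddos_refStates, h3, hchain]
        simp only [detect_ddos_seqFor]
        rw [if_neg (by simp [hs]), if_pos (by simp [hi])]
        simp [List.range_succ_eq_map, List.map_map, Function.comp_def]
      · have h3 : detect_ddos_nextA high interval 3 3 r = 6 := by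
          simp [detect_ddos_nextA, hr, hi]
        have hchain := detect_ddos_chain_emit high interval t ht 6 [9]
          (detect_ddos_chainOK6 high interval)
        rw [detect_ddos_refStates, h1, detect_ddos_refStates, h2,
            detect_ddos_refStates, h3, hchain]
        simp only [detect_ddos_seqFor]
        rw [if_neg (by simp [hs]), if_neg (by simp [hi]), if_pos (by simp)]
        simp [List.range_succ_eq_map, List.map_map, Function.comp_def]

lemma detect_ddos_dropWhile_head {α : Type} (f : α → Bool) :
    ∀ (l : List α) (q : α) (t : List α), l.dropWhile f = q :: t → f q = false := by
  intro l
  induction l with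
  | nil => intro q t h; simp [List.dropWhile] at h
  | cons a l ih =>
    intro q t h
    by_cases ha : f a = true
    · rw [List.dropWhile_cons_of_pos ha] at h; exact ih q t h
    · rw [List.dropWhile_cons_of_neg ha] at h
      cases h; simpa using ha

-- B's run recursion computes exactly A's reference state sequence
lemma detect_ddos_runs_eq (high interval : Int) :
    ∀ (n : ℕ) (l : List (Int × String × Int)), l.length ≤ n →
      detect_ddos_runs high interval l = detect_ddos_refStates high interval 0 l := by
  intro n
  induction n with
  | zero =>
    intro l hl
    have : l = [] := List.eq_nil_of_length_eq_zero (by omega)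
    subst this; simp [detect_ddos_runs, detect_ddos_refStates]
  | succ n ih =>
    intro l hl
    cases l with
    | nil => simp [detect_ddos_runs, detect_ddos_refStates]
    | cons p rest =>
      by_cases hp : p.1 ≤ high
      · rw [detect_ddos_runs, dif_pos hp, ih rest (by simpa using Nat.lt_succ_iff.mp hl)]
        simp [detect_ddos_refStates, detect_ddos_nextA_low _ _ _ _ hp]
      · rw [detect_ddos_runs, dif_neg hp]
        have hptrue : (fun q : Int × String × Int => decide (q.1 > high)) p = true := by
          simp; omega
        set f : Int × String × Int → Bool := fun q => decide (q.1 > high) with hf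
        have hsplit : (p :: rest).takeWhile f ++ (p :: rest).dropWhile f = p :: rest :=
          List.takeWhile_append_dropWhile
        have hrunne : (p :: rest).takeWhile f ≠ [] := by
          rw [List.takeWhile_cons_of_pos hptrue]; simp
        have hrunall : ∀ q ∈ (p :: rest).takeWhile f, q.1 > high := by
          intro q hq
          have := List.mem_takeWhile_imp hq
          simpa [hf] using this
        have hdroplen : ((p :: rest).dropWhile f).length ≤ n := by
          rw [List.dropWhile_cons_of_pos hptrue]
          have := List.length_dropWhile_le (p := f) (l := rest)
          simp at hl; omega
        have hdrophead : ∀ q ∈ ((p :: rest).dropWhile f).head?, q.1 ≤ high := by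
          intro q hq
          cases hdw : (p :: rest).dropWhile f with
          | nil => rw [hdw] at hq; simp at hq
          | cons q' t' =>
            rw [hdw] at hq; simp at hq; subst hq
            have := detect_ddos_dropWhile_head f (p :: rest) q' t' hdw
            simpa [hf] using this
        calc detect_ddos_seqFor interval ((p :: rest).takeWhile f)
              ++ detect_ddos_runs high interval ((p :: rest).dropWhile f)
            = detect_ddos_refStates high interval 0 ((p :: rest).takeWhile f)
              ++ detect_ddos_refStates high interval 0 ((p :: rest).dropWhile f) := by
              rw [detect_ddos_run_emit high interval _ hrunne hrunall,
                  ih _ hdroplen]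
          _ = detect_ddos_refStates high interval 0 ((p :: rest).takeWhile f)
              ++ detect_ddos_refStates high interval
                   (detect_ddos_refFinal high interval 0 ((p :: rest).takeWhile f))
                   ((p :: rest).dropWhile f) := by
              rw [detect_ddos_refStates_reset high interval 0
                    (detect_ddos_refFinal high interval 0 ((p :: rest).takeWhile f)) _ hdrophead]
          _ = detect_ddos_refStates high interval 0 (p :: rest) := by
              rw [← detect_ddos_refStates_append, hsplit]

-- ===== VERDICT (by name: the statement is the Claim_ definition above) =====
theorem detect_ddos_spec : Claim_equal_detect_ddos := by
  intro pc pt it th _ _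
  unfold Spec_detect_ddos detect_ddos detect_ddos_alt
  simp only [detect_ddos_foldA]
  rw [detect_ddos_runs_eq _ _ (pc.zip (pt.zip it)).length _ le_rfl]
  cases h : pc.zip (pt.zip it) with
  | nil => simp [detect_ddos_refStates]
  | cons a l => simp
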